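-- pv_equiv track=rewrite | github.com/azech-hqs/adventofcode | 2022/day6/packet.py | inspect_packets
-- ===== SOURCE A (Python) =====
-- from collections import Counter
--
-- def inspect_packets(signal: str, buffer_size: int = 4) -> int:
--     signal_length = len(signal)
--     marker = 0
--     for i in range(signal_length - buffer_size):
--         buffer = signal[i:i+buffer_size]
--         cnt = Counter(buffer)
--         all_different = all([v == 1 for v in cnt.values()])
--         if all_different:
--             marker = i + buffer_size
--             break
--     return marker
-- ===== SOURCE B (Python) =====
-- def inspect_packets(sig: str, buffer_size: int = 4) -> int:
--     s = sig
--     n = len(s)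
--     if buffer_size <= 0 or n - buffer_size <= 0:
--         return 0
--     # sliding window: counts of chars in current window, dups = window length
--     # minus number of distinct chars in it (0 iff all different)
--     counts = {}
--     dups = 0
--     for c in s[:buffer_size]:
--         prev = counts.get(c, 0)
--         counts[c] = prev + 1
--         if prev > 0:
--             dups += 1
--     if dups == 0:
--         return buffer_size
--     for i in range(1, n - buffer_size):
--         oc = s[i - 1]
--         rem = counts[oc] - 1
--         counts[oc] = rem
--         if rem > 0:
--             dups -= 1
--         ic = s[i + buffer_size - 1]
--         prev = counts.get(ic, 0)
--         counts[ic] = prev + 1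
--         if prev > 0:
--             dups += 1
--         if dups == 0:
--             return i + buffer_size
--     return 0
-- ===== Notes on version B (the rewrite author's own statement) =====
-- stated objective: faster
-- what changed: Replaces the per-window Counter rebuild with a single sliding window that updates character counts and a duplicate counter incrementally, so each step is O(1) instead of O(buffer_size).
-- outside the precondition, e.g. on inspect_packets('abc', -1): A returns -1, B returns 0
import Mathlib
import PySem

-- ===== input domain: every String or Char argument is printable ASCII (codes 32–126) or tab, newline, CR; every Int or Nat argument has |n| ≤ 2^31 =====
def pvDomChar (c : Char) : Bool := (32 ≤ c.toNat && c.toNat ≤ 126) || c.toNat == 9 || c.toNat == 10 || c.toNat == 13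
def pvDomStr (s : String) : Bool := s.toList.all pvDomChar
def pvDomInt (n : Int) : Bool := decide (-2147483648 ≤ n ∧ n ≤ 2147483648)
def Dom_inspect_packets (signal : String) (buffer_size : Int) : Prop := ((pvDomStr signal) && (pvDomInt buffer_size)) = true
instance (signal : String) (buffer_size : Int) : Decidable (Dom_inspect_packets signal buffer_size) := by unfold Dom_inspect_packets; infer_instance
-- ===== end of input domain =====

-- B replaces A's per-window Counter rebuild by a sliding window with incremental
-- character counts and a duplicate counter (objective: faster, O(n) vs O(n*k)).

-- ===== PORT A =====
def pvALoop (cs : List Char) (bs : Int) (bound : Int) (i : Int) : Int :=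
  if h : i < bound then
    let buffer := PySem.List.slice cs (some i) (some (i + bs))
    let cnt := PySem.Dict.counter buffer
    let all_different := cnt.values.all (fun v => v == 1)
    if all_different then i + bs else pvALoop cs bs bound (i + 1)
  else 0
termination_by (bound - i).toNat
decreasing_by omega

def inspect_packets (signal : String) (buffer_size : Int) : Int :=
  let cs := signal.toList
  let signal_length : Int := cs.length
  pvALoop cs buffer_size (signal_length - buffer_size) 0

-- ===== PORT B =====
def pvBInit : PySem.Dict Char Int → Int → List Char → PySem.Dict Char Int × Int
  | counts, dups, [] => (counts, dups)
  | counts, dups, c :: rest =>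
    let prev := counts.getD c 0
    let counts' := counts.insert c (prev + 1)
    let dups' := if prev > 0 then dups + 1 else dups
    pvBInit counts' dups' rest

def pvBLoop (cs : List Char) (bs : Int) : PySem.Dict Char Int → Int → List Int → Int
  | _, _, [] => 0
  | counts, dups, i :: rest =>
    let oc := PySem.List.pyGetD cs (i - 1) ' '
    let rem := counts.getD oc 0 - 1
    let counts1 := counts.insert oc rem
    let dups1 := if rem > 0 then dups - 1 else dups
    let ic := PySem.List.pyGetD cs (i + bs - 1) ' '
    let prev := counts1.getD ic 0
    let counts2 := counts1.insert ic (prev + 1)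
    let dups2 := if prev > 0 then dups1 + 1 else dups1
    if dups2 == 0 then i + bs else pvBLoop cs bs counts2 dups2 rest

def inspect_packets_alt (signal : String) (buffer_size : Int) : Int :=
  let cs := signal.toList
  let n : Int := cs.length
  if buffer_size ≤ 0 || n - buffer_size ≤ 0 then 0
  else
    let st := pvBInit PySem.Dict.empty 0 (PySem.List.slice cs none (some buffer_size))
    if st.2 == 0 then buffer_size
    else pvBLoop cs buffer_size st.1 st.2 (PySem.List.pyRange 1 (n - buffer_size) 1)

-- ===== PRECONDITION & SPEC =====
-- Pre_ excludes negative buffer sizes, which are outside the task's natural domain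
-- (a buffer size is a count); there A slides a shrinking negative-end slice and can
-- return a negative result, an artefact B does not mirror (B returns 0).
def Pre_inspect_packets (signal : String) (buffer_size : Int) : Prop := 0 ≤ buffer_size
instance (signal : String) (buffer_size : Int) : Decidable (Pre_inspect_packets signal buffer_size) := by unfold Pre_inspect_packets; infer_instance
def pvWitness_inspect_packets : String × Int := ("aabcd", 3)

def Spec_inspect_packets (signal : String) (buffer_size : Int) (out : Int) : Prop := out = inspect_packets_alt signal buffer_size
instance (signal : String) (buffer_size : Int) (out : Int) : Decidable (Spec_inspect_packets signal buffer_size out) := by unfold Spec_inspect_packets; infer_instance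

-- ===== CLAIM (what is proved, stated in full; the proofs are below) =====
def Claim_equal_inspect_packets : Prop := ∀ (signal : String) (buffer_size : Int), Dom_inspect_packets signal buffer_size → Pre_inspect_packets signal buffer_size → Spec_inspect_packets signal buffer_size (inspect_packets signal buffer_size)

-- ===== LEMMAS AND PROOFS =====

-- the common spec: first i in [j, j+L) whose window of size k is all-distinct, as i+k; else 0
def pvF (cs : List Char) (k : Nat) : Nat → Nat → Int
  | _, 0 => 0
  | j, L+1 => if ((cs.drop j).take k).Nodup then (j : Int) + (k : Int) else pvF cs k (j+1) L

-- A's per-window check: all Counter values are 1 iff the window has no duplicates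
theorem pv_counterAll (l : List Char) :
    ((PySem.Dict.counter l).values.all (fun v => v == 1)) = decide l.Nodup := by
  have hv : (PySem.Dict.counter l).values = (PySem.Set.ofList l).map (fun c => (l.count c : Int)) := by
    have := PySem.Dict.items_counter (xs := l)
    simp only [PySem.Dict.values, this, List.map_map]
    rfl
  rw [hv]
  rcases Bool.eq_false_or_eq_true (decide l.Nodup) with h | h <;> rw [h]
  · rw [List.all_eq_true]
    rw [decide_eq_true_iff] at h
    intro v hvm
    obtain ⟨a, ham, rfl⟩ := List.mem_map.1 hvm
    have : a ∈ l := by simpa [PySem.Set.mem_ofList] using ham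
    have h1 : l.count a ≤ 1 := List.nodup_iff_count_le_one.1 h a
    have h2 : 0 < l.count a := List.count_pos_iff.2 this
    simp; omega
  · rw [List.all_eq_false]
    rw [decide_eq_false_iff_not] at h
    rw [List.nodup_iff_count_le_one] at h
    push Not at h
    obtain ⟨a, ha⟩ := h
    have hmem : a ∈ l := by
      by_contra hm
      simp [List.count_eq_zero_of_not_mem hm] at ha
    refine ⟨(l.count a : Int), List.mem_map.2 ⟨a, ?_, rfl⟩, ?_⟩
    · simpa [PySem.Set.mem_ofList] using hmem
    · simp; omega

-- A's loop computes pvF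
theorem pv_aLoop_range (cs : List Char) (k : Nat) :
    ∀ (L j : Nat), pvALoop cs (k : Int) ((j + L : Nat) : Int) (j : Int) = pvF cs k j L := by
  intro L
  induction L with
  | zero =>
    intro j
    rw [pvALoop, dif_neg (by push_cast; omega)]
    rfl
  | succ L ih =>
    intro j
    rw [pvALoop, dif_pos (by push_cast; omega)]
    show (if ((PySem.Dict.counter (PySem.List.slice cs (some (j:Int)) (some ((j:Int) + (k:Int))))).values.all (fun v => v == 1)) = true then (j:Int) + (k:Int) else pvALoop cs (k:Int) ((j + (L+1) : Nat) : Int) ((j:Int)+1)) = pvF cs k j (L+1)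
    rw [PySem.List.slice_natCast_add, pv_counterAll]
    have he : ((j:Int)+1) = ((j+1 : Nat) : Int) := by push_cast; ring
    have he2 : ((j + (L+1) : Nat) : Int) = (((j+1) + L : Nat) : Int) := by push_cast; ring
    rw [he, he2, ih (j+1)]
    rw [pvF]
    by_cases h : ((cs.drop j).take k).Nodup <;> simp [h]
theorem pv_aLoop_nil (cs : List Char) (bs bound : Int) (h : bound ≤ 0) :
    pvALoop cs bs bound 0 = 0 := by
  rw [pvALoop, dif_neg (by omega)]

-- B's loop invariant: counts holds the multiplicities of the current window and
-- dups its length minus its number of distinct characters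
def pvInv (counts : PySem.Dict Char Int) (dups : Int) (l : List Char) : Prop :=
  (∀ c, counts.getD c 0 = (l.count c : Int)) ∧ dups = (l.length : Int) - l.toFinset.card

theorem pv_card_le (l : List Char) : l.toFinset.card ≤ l.length := List.toFinset_card_le l

theorem pv_card_eq_iff (l : List Char) : l.toFinset.card = l.length ↔ l.Nodup := by
  constructor
  · intro h
    have := Multiset.toFinset_card_eq_card_iff_nodup (m := (l : Multiset Char))
    simpa using this.1 (by simpa using h)
  · intro h; exact List.toFinset_card_of_nodup h

theorem pv_inv_zero {counts : PySem.Dict Char Int} {dups : Int} {l : List Char}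
    (h : pvInv counts dups l) : dups = 0 ↔ l.Nodup := by
  obtain ⟨-, h2⟩ := h
  rw [← pv_card_eq_iff]
  have := pv_card_le l
  omega

theorem pv_inv_add {counts : PySem.Dict Char Int} {dups : Int} {l : List Char}
    (h : pvInv counts dups l) (c : Char) :
    pvInv (counts.insert c (counts.getD c 0 + 1))
      (if counts.getD c 0 > 0 then dups + 1 else dups) (l ++ [c]) := by
  obtain ⟨h1, h2⟩ := h
  constructor
  · intro c'
    rw [PySem.Dict.getD_insert]
    by_cases hc : c' = c
    · simp [hc, h1, List.count_append]
    · have : ¬ c = c' := fun h => hc h.symm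
      simp [h1, List.count_append, this, hc]
  · have hfin : (l ++ [c]).toFinset = insert c l.toFinset := by
      simp [List.toFinset_append]
    have hcnt : counts.getD c 0 = (l.count c : Int) := h1 c
    by_cases hm : c ∈ l
    · have hpos : counts.getD c 0 > 0 := by
        rw [hcnt]; exact_mod_cast List.count_pos_iff.2 hm
      rw [if_pos hpos, hfin, Finset.insert_eq_self.2 (List.mem_toFinset.2 hm)]
      simp only [List.length_append, List.length_cons, List.length_nil]
      push_cast
      omega
    · have hpos : ¬ counts.getD c 0 > 0 := by
        rw [hcnt]; simp [List.count_eq_zero_of_not_mem hm]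
      rw [if_neg hpos, hfin, Finset.card_insert_of_notMem (by simp [hm])]
      simp only [List.length_append, List.length_cons, List.length_nil]
      push_cast
      omega

theorem pv_inv_rem {counts : PySem.Dict Char Int} {dups : Int} {c0 : Char} {m : List Char}
    (h : pvInv counts dups (c0 :: m)) :
    pvInv (counts.insert c0 (counts.getD c0 0 - 1))
      (if counts.getD c0 0 - 1 > 0 then dups - 1 else dups) m := by
  obtain ⟨h1, h2⟩ := h
  have hc0 : counts.getD c0 0 = (m.count c0 : Int) + 1 := by
    rw [h1 c0]; simp
  constructor
  · intro c'
    rw [PySem.Dict.getD_insert]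
    by_cases hc : c' = c0
    · subst hc; rw [if_pos rfl, hc0]; omega
    · rw [if_neg hc, h1 c']
      have : ¬ c0 = c' := fun h => hc h.symm
      simp [this]
  · have hfin : (c0 :: m).toFinset = insert c0 m.toFinset := by simp
    by_cases hm : c0 ∈ m
    · have hpos : counts.getD c0 0 - 1 > 0 := by
        rw [hc0]; have := List.count_pos_iff.2 hm; omega
      rw [if_pos hpos]
      rw [hfin, Finset.insert_eq_self.2 (List.mem_toFinset.2 hm)] at h2
      simp only [List.length_cons] at h2
      push_cast at h2 ⊢
      omega
    · have hpos : ¬ counts.getD c0 0 - 1 > 0 := by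
        rw [hc0]; simp [List.count_eq_zero_of_not_mem hm]
      rw [if_neg hpos]
      rw [hfin, Finset.card_insert_of_notMem (by simp [hm])] at h2
      simp only [List.length_cons] at h2
      push_cast at h2 ⊢
      omega

theorem pv_bInit_inv : ∀ (rest : List Char) (counts : PySem.Dict Char Int) (dups : Int) (p : List Char),
    pvInv counts dups p → pvInv (pvBInit counts dups rest).1 (pvBInit counts dups rest).2 (p ++ rest) := by
  intro rest
  induction rest with
  | nil => intro counts dups p h; simpa [pvBInit] using h
  | cons c rest ih =>
    intro counts dups p h
    rw [pvBInit]
    have := ih _ _ (p ++ [c]) (pv_inv_add h c)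
    simpa using this

theorem pv_bLoop_eq (cs : List Char) (k : Nat) (hk : 1 ≤ k) :
    ∀ (L j : Nat) (counts : PySem.Dict Char Int) (dups : Int), 1 ≤ j → j + L + k = cs.length →
      pvInv counts dups ((cs.drop (j-1)).take k) →
      pvBLoop cs (k : Int) counts dups (PySem.List.pyRange (j : Int) ((j + L : Nat) : Int) 1) = pvF cs k j L := by
  intro L
  induction L with
  | zero =>
    intro j counts dups hj hlen hInv
    rw [PySem.List.pyRange_one_eq_nil (by push_cast; omega)]
    rfl
  | succ L ih =>
    intro j counts dups hj hlen hInv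
    rw [PySem.List.pyRange_one_cons (by push_cast; omega)]
    rw [pvBLoop]
    have hj1 : j - 1 < cs.length := by omega
    have hjk : j + k - 1 < cs.length := by omega
    -- index rewrites
    have hoc : PySem.List.pyGetD cs ((j : Int) - 1) ' ' = cs[j-1] := by
      have : ((j : Int) - 1) = ((j - 1 : Nat) : Int) := by push_cast [Nat.cast_sub hj]; ring
      rw [this, PySem.List.pyGetD_natCast, List.getD_eq_getElem _ _ hj1]
    have hic : PySem.List.pyGetD cs ((j : Int) + (k : Int) - 1) ' ' = cs[j+k-1] := by
      have : ((j : Int) + (k : Int) - 1) = ((j + k - 1 : Nat) : Int) := by push_cast [Nat.cast_sub (by omega : 1 ≤ j + k)]; ring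
      rw [this, PySem.List.pyGetD_natCast, List.getD_eq_getElem _ _ hjk]
    -- window decompositions
    have hwin1 : (cs.drop (j-1)).take k = cs[j-1] :: ((cs.drop j).take (k-1)) := by
      rw [List.drop_eq_getElem_cons hj1]
      have : j - 1 + 1 = j := by omega
      rw [this]
      obtain ⟨k', rfl⟩ : ∃ k', k = k' + 1 := ⟨k - 1, by omega⟩
      simp [List.take_succ_cons]
    have hwin2 : (cs.drop j).take k = ((cs.drop j).take (k-1)) ++ [cs[j+k-1]] := by
      obtain ⟨k', hk'⟩ : ∃ k', k = k' + 1 := ⟨k - 1, by omega⟩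
      subst hk'
      have hlt : k' < (cs.drop j).length := by rw [List.length_drop]; omega
      have e : j + (k' + 1) - 1 = j + k' := by omega
      simp only [e, Nat.add_sub_cancel]
      rw [List.take_add_one, List.getElem?_eq_getElem hlt, List.getElem_drop]
      simp
    rw [hwin1] at hInv
    have hInv1 := pv_inv_rem hInv
    have hInv2 := pv_inv_add hInv1 cs[j+k-1]
    rw [← hwin2] at hInv2
    rw [hoc, hic]
    set counts2 := (counts.insert cs[j-1] (counts.getD cs[j-1] 0 - 1)).insert cs[j+k-1]
        ((counts.insert cs[j-1] (counts.getD cs[j-1] 0 - 1)).getD cs[j+k-1] 0 + 1) with hc2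
    set dups2 := (if (counts.insert cs[j-1] (counts.getD cs[j-1] 0 - 1)).getD cs[j+k-1] 0 > 0
        then (if counts.getD cs[j-1] 0 - 1 > 0 then dups - 1 else dups) + 1
        else (if counts.getD cs[j-1] 0 - 1 > 0 then dups - 1 else dups)) with hd2
    have hzero := pv_inv_zero hInv2
    rw [pvF]
    by_cases hnd : ((cs.drop j).take k).Nodup
    · rw [if_pos hnd, if_pos (by simp [hzero.2 hnd])]
    · rw [if_neg hnd, if_neg (by simp; exact fun hq => hnd (hzero.1 hq))]
      have he1 : ((j:Int) + 1) = ((j+1 : Nat) : Int) := by push_cast; ring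
      have he2 : ((j + (L+1) : Nat) : Int) = (((j+1) + L : Nat) : Int) := by push_cast; ring
      rw [he1, he2]
      apply ih
      · omega
      · omega
      · simpa using hInv2

theorem pv_inv_empty : pvInv PySem.Dict.empty 0 [] := by
  constructor
  · intro c; simp [PySem.Dict.getD_empty]
  · simp

theorem pvF_zero_k (cs : List Char) : ∀ (L : Nat), pvF cs 0 0 L = 0 := by
  intro L
  cases L with
  | zero => rfl
  | succ L => rw [pvF]; simp

theorem pv_main (signal : String) (buffer_size : Int) (hpre : 0 ≤ buffer_size) :
    inspect_packets signal buffer_size = inspect_packets_alt signal buffer_size := by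
  simp only [inspect_packets, inspect_packets_alt]
  set cs := signal.toList with hcs
  set n := cs.length with hn
  have hbk : buffer_size = (buffer_size.toNat : Int) := (Int.toNat_of_nonneg hpre).symm
  set k := buffer_size.toNat with hkdef
  by_cases h1 : buffer_size ≤ 0
  · have hb0 : buffer_size = 0 := le_antisymm h1 hpre
    rw [if_pos (by simp [h1]), hb0]
    have e1 : (n : Int) - 0 = ((0 + n : Nat) : Int) := by push_cast; ring
    rw [e1]
    have := pv_aLoop_range cs 0 n 0
    simpa using this.trans (pvF_zero_k cs n)
  · have hkpos : 1 ≤ k := by omega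
    by_cases h2 : (n : Int) - buffer_size ≤ 0
    · rw [if_pos (by simp [h2])]
      exact pv_aLoop_nil cs buffer_size _ (by omega)
    · rw [if_neg (by simp [h1, h2])]
      have hnk : k < n := by omega
      have hslice : PySem.List.slice cs none (some buffer_size) = cs.take k := by
        rw [hbk, PySem.List.slice_to_natCast]
      rw [hslice]
      have hst := pv_bInit_inv (cs.take k) PySem.Dict.empty 0 [] pv_inv_empty
      simp only [List.nil_append] at hst
      have hA : pvALoop cs buffer_size ((n : Int) - buffer_size) 0 = pvF cs k 0 (n - k) := by
        have h := pv_aLoop_range cs k (n - k) 0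
        have e : ((0 + (n - k) : Nat) : Int) = (n : Int) - (k : Int) := by push_cast; omega
        rw [e] at h
        rw [hbk]
        simpa using h
      rw [hA]
      obtain ⟨L, hL⟩ : ∃ L, n - k = L + 1 := ⟨n - k - 1, by omega⟩
      rw [hL, pvF]
      simp only [List.drop_zero]
      by_cases hnd : (cs.take k).Nodup
      · rw [if_pos hnd]
        have hz : ((pvBInit PySem.Dict.empty 0 (cs.take k)).2 == 0) = true := by
          simp [(pv_inv_zero hst).2 hnd]
        rw [if_pos hz, hbk]
        push_cast
        ring
      · rw [if_neg hnd]
        have hz : ((pvBInit PySem.Dict.empty 0 (cs.take k)).2 == 0) = false := by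
          simp; exact fun hq => hnd ((pv_inv_zero hst).1 hq)
        rw [if_neg (by simp [hz])]
        have e1 : (1 : Int) = ((1 : Nat) : Int) := rfl
        have e2 : (n : Int) - (k : Int) = ((1 + L : Nat) : Int) := by push_cast; omega
        rw [hbk, e2, e1]
        have := pv_bLoop_eq cs k hkpos L 1 _ _ (by omega) (by omega) (by simpa using hst)
        simpa using this.symm

-- ===== VERDICT (by name: the statement is the Claim_ definition above) =====
theorem inspect_packets_spec : Claim_equal_inspect_packets := by
  intro signal buffer_size _ hpre
  unfold Spec_inspect_packets
  exact pv_main signal buffer_size hpre
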